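-- pv_equiv track=rewrite | github.com/ousma15abdoulaye-crypto/decision-memory-v1 | scripts/validate_mrd_state.py | _compute_migration_delta
-- ===== SOURCE A (Python) =====
-- _KNOWN_MIGRATION_CHAIN: list[str] = [
--     "044_decision_history",
--     "045_agent_native_foundation",
--     "046_imc_category_item_map",
--     "046b_imc_map_fix_restrict_indexes",
--     "047_couche_a_service_columns",
--     "048_vendors_sensitive_data",
--     "049_validate_pipeline_runs_fk",
--     "050_documents_sha256_not_null",
--     "051_cases_tenant_user_tenants_rls",
--     "052_dm_app_rls_role",
--     "053_dm_app_enforce_security_attrs",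
--     "054_m12_correction_log",
--     "055_extend_rls_documents_extraction_jobs",
--     "056_evaluation_documents",
-- ]
--
-- def _compute_migration_delta(db_versions: list[str]) -> list[str]:
--     """Retourne la liste ordonnee des migrations manquantes entre db_versions et le head."""
--     if not db_versions:
--         return _KNOWN_MIGRATION_CHAIN[:]
--     current_idx = None
--     for v in db_versions:
--         if v in _KNOWN_MIGRATION_CHAIN:
--             idx = _KNOWN_MIGRATION_CHAIN.index(v)
--             if current_idx is None or idx > current_idx:
--                 current_idx = idx
--     if current_idx is None:
--         return _KNOWN_MIGRATION_CHAIN[:]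
--     return _KNOWN_MIGRATION_CHAIN[current_idx + 1 :]
-- ===== SOURCE B (Python) =====
-- _KNOWN_MIGRATION_CHAIN: list[str] = [
--     "044_decision_history",
--     "045_agent_native_foundation",
--     "046_imc_category_item_map",
--     "046b_imc_map_fix_restrict_indexes",
--     "047_couche_a_service_columns",
--     "048_vendors_sensitive_data",
--     "049_validate_pipeline_runs_fk",
--     "050_documents_sha256_not_null",
--     "051_cases_tenant_user_tenants_rls",
--     "052_dm_app_rls_role",
--     "053_dm_app_enforce_security_attrs",
--     "054_m12_correction_log",
--     "055_extend_rls_documents_extraction_jobs",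
--     "056_evaluation_documents",
-- ]
--
--
-- def _compute_migration_delta(db_versions: list[str]) -> list[str]:
--     """Scan the fixed chain from the top down; everything after the highest applied entry is missing."""
--     applied = set(db_versions)
--     for i in range(len(_KNOWN_MIGRATION_CHAIN) - 1, -1, -1):
--         if _KNOWN_MIGRATION_CHAIN[i] in applied:
--             return _KNOWN_MIGRATION_CHAIN[i + 1:]
--     return _KNOWN_MIGRATION_CHAIN[:]
-- ===== Notes on version B (the rewrite author's own statement) =====
-- stated objective: idiomatic
-- what changed: Instead of scanning db_versions and maintaining a running-max chain index via repeated 'in'/'.index' list scans, B builds a set of applied versions once and walks the fixed chain from the top down, returning the tail after the first (highest) applied entry, or the whole chain if none is applied.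
import Mathlib
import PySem

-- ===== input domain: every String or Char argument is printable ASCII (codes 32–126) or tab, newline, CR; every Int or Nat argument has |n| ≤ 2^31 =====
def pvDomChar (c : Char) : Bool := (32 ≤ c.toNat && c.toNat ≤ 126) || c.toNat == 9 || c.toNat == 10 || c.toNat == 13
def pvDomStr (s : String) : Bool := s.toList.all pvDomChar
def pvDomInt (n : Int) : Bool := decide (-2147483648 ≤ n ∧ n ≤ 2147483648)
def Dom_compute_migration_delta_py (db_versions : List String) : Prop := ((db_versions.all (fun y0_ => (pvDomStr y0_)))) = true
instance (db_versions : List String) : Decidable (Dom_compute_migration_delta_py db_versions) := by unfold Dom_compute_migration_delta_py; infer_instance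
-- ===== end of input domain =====

-- B replaces A's per-input scan with a single top-down pass over the fixed chain against a set (idiomatic; same return value).

def pvChain : List String := [
  "044_decision_history",
  "045_agent_native_foundation",
  "046_imc_category_item_map",
  "046b_imc_map_fix_restrict_indexes",
  "047_couche_a_service_columns",
  "048_vendors_sensitive_data",
  "049_validate_pipeline_runs_fk",
  "050_documents_sha256_not_null",
  "051_cases_tenant_user_tenants_rls",
  "052_dm_app_rls_role",
  "053_dm_app_enforce_security_attrs",
  "054_m12_correction_log",
  "055_extend_rls_documents_extraction_jobs",
  "056_evaluation_documents"]

-- ===== PORT A =====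
-- loop body: 'if v in chain: idx = chain.index(v); if current_idx is None or idx > current_idx: current_idx = idx'
def pvAStep (cur : Option Nat) (v : String) : Option Nat :=
  if v ∈ pvChain then
    match PySem.List.index? pvChain v with
    | some idx =>
      match cur with
      | none => some idx
      | some c => if c < idx then some idx else some c
    | none => cur
  else cur

def compute_migration_delta_py (db_versions : List String) : List String :=
  if db_versions = [] then PySem.List.slice pvChain none none
  else
    match db_versions.foldl pvAStep none with
    | none => PySem.List.slice pvChain none none
    | some i => PySem.List.slice pvChain (some ((i : Int) + 1)) none

-- ===== PORT B =====
-- 'for i in range(len(chain)-1, -1, -1): if chain[i] in applied: return chain[i+1:]' — k counts how many low indices remain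
def pvAltGo (applied : List String) : Nat → List String
  | 0 => PySem.List.slice pvChain none none
  | k + 1 =>
    if pvChain.getD k "" ∈ applied then PySem.List.slice pvChain (some ((k : Int) + 1)) none
    else pvAltGo applied k

def compute_migration_delta_py_alt (db_versions : List String) : List String :=
  pvAltGo (PySem.Set.ofList db_versions) pvChain.length

-- ===== PRECONDITION & SPEC =====
def Spec_compute_migration_delta_py (db_versions : List String) (out : List String) : Prop := out = compute_migration_delta_py_alt db_versions
instance (db_versions : List String) (out : List String) : Decidable (Spec_compute_migration_delta_py db_versions out) := by unfold Spec_compute_migration_delta_py; infer_instance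

-- ===== CLAIM (what is proved, stated in full; the proofs are below) =====
def Claim_equal_compute_migration_delta_py : Prop := ∀ (db_versions : List String), Dom_compute_migration_delta_py db_versions → Spec_compute_migration_delta_py db_versions (compute_migration_delta_py db_versions)

-- ===== LEMMAS AND PROOFS =====

-- the hit index of one string: chain.index(v) if v in chain, else nothing
def pvHit (v : String) : Option Nat := PySem.List.index? pvChain v

lemma pvAStep_of_none (cur : Option Nat) (v : String) (hx : pvHit v = none) :
    pvAStep cur v = cur := by
  have hv : v ∉ pvChain := (PySem.List.index?_eq_none_iff _ _).mp hx
  unfold pvAStep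
  rw [if_neg hv]

lemma pvAStep_none_some (v : String) (idx : Nat) (hx : pvHit v = some idx) :
    pvAStep none v = some idx := by
  have hv : v ∈ pvChain := (PySem.List.index?_isSome_iff _ _).mp (by rw [pvHit] at hx; rw [hx]; rfl)
  unfold pvAStep
  rw [if_pos hv]
  rw [pvHit] at hx
  rw [hx]

lemma pvAStep_some_some (c : Nat) (v : String) (idx : Nat) (hx : pvHit v = some idx) :
    pvAStep (some c) v = some (max c idx) := by
  have hv : v ∈ pvChain := (PySem.List.index?_isSome_iff _ _).mp (by rw [pvHit] at hx; rw [hx]; rfl)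
  unfold pvAStep
  rw [if_pos hv]
  rw [pvHit] at hx
  rw [hx]
  have h : (if c < idx then some idx else some c) = some (max c idx) := by
    split_ifs with h <;> congr 1 <;> omega
  exact h

lemma pvFold_none (db : List String) :
    ∀ cur, db.foldl pvAStep cur = none ↔ cur = none ∧ ∀ v ∈ db, pvHit v = none := by
  induction db with
  | nil => intro cur; simp
  | cons x xs ih =>
    intro cur
    rw [List.foldl_cons]
    rcases hx : pvHit x with _ | idx
    · rw [pvAStep_of_none cur x hx, ih]
      constructor
      · rintro ⟨h1, h2⟩
        refine ⟨h1, fun v hv => ?_⟩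
        rcases List.mem_cons.mp hv with rfl | hv
        · exact hx
        · exact h2 v hv
      · rintro ⟨h1, h2⟩
        exact ⟨h1, fun v hv => h2 v (List.mem_cons_of_mem _ hv)⟩
    · constructor
      · intro h1
        exfalso
        cases cur with
        | none =>
          rw [pvAStep_none_some x idx hx, ih] at h1
          exact (by simp at h1 : False)
        | some c =>
          rw [pvAStep_some_some c x idx hx, ih] at h1
          exact (by simp at h1 : False)
      · rintro ⟨h1, h2⟩
        have := h2 x (by simp)
        rw [hx] at this
        cases this

lemma pvFold_some (db : List String) :
    ∀ cur i, db.foldl pvAStep cur = some i →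
      (cur = some i ∨ ∃ v ∈ db, pvHit v = some i) ∧
      (∀ c, cur = some c → c ≤ i) ∧
      (∀ v ∈ db, ∀ j, pvHit v = some j → j ≤ i) := by
  induction db with
  | nil =>
    intro cur i h
    rw [List.foldl_nil] at h
    refine ⟨Or.inl h, fun c hc => ?_, by simp⟩
    rw [h] at hc; injection hc with hc; omega
  | cons x xs ih =>
    intro cur i h
    rw [List.foldl_cons] at h
    rcases hx : pvHit x with _ | idx
    · rw [pvAStep_of_none cur x hx] at h
      obtain ⟨h1, h2, h3⟩ := ih cur i h
      refine ⟨?_, h2, ?_⟩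
      · rcases h1 with h1 | ⟨v, hv, hh⟩
        · exact Or.inl h1
        · exact Or.inr ⟨v, List.mem_cons_of_mem _ hv, hh⟩
      · intro v hv j hj
        rcases List.mem_cons.mp hv with rfl | hv
        · rw [hx] at hj; cases hj
        · exact h3 v hv j hj
    · cases cur with
      | none =>
        rw [pvAStep_none_some x idx hx] at h
        obtain ⟨h1, h2, h3⟩ := ih (some idx) i h
        have hidx : idx ≤ i := h2 idx rfl
        refine ⟨?_, by rintro c ⟨⟩, ?_⟩
        · rcases h1 with h1 | ⟨v, hv, hh⟩
          · exact Or.inr ⟨x, by simp, by rw [hx, h1]⟩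
          · exact Or.inr ⟨v, List.mem_cons_of_mem _ hv, hh⟩
        · intro v hv j hj
          rcases List.mem_cons.mp hv with rfl | hv
          · rw [hx] at hj; injection hj with hj; omega
          · exact h3 v hv j hj
      | some c =>
        rw [pvAStep_some_some c x idx hx] at h
        obtain ⟨h1, h2, h3⟩ := ih (some (max c idx)) i h
        have hmax : max c idx ≤ i := h2 _ rfl
        refine ⟨?_, ?_, ?_⟩
        · rcases h1 with h1 | ⟨v, hv, hh⟩
          · injection h1 with h1
            rcases Nat.le_total c idx with hle | hle
            · rw [Nat.max_eq_right hle] at h1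
              exact Or.inr ⟨x, by simp, by rw [hx, h1]⟩
            · rw [Nat.max_eq_left hle] at h1
              exact Or.inl (by rw [h1])
          · exact Or.inr ⟨v, List.mem_cons_of_mem _ hv, hh⟩
        · rintro c' hc'; injection hc' with hc'; subst hc'; omega
        · intro v hv j hj
          rcases List.mem_cons.mp hv with rfl | hv
          · rw [hx] at hj; injection hj with hj; omega
          · exact h3 v hv j hj

lemma pvHit_some (v : String) (j : Nat) (h : pvHit v = some j) :
    j < pvChain.length ∧ pvChain.getD j "" = v := by
  obtain ⟨hk, hv, -⟩ := PySem.List.getElem_of_index?_eq_some h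
  exact ⟨hk, by rw [List.getD_eq_getElem _ _ hk, hv]⟩

lemma pvHit_getD : ∀ j < pvChain.length, pvHit (pvChain.getD j "") = some j := by decide

-- A's whole computation as one expression (A's empty-input branch returns the same chain copy)
def pvCanon (db : List String) : List String :=
  match db.foldl pvAStep none with
  | none => PySem.List.slice pvChain none none
  | some i => PySem.List.slice pvChain (some ((i : Int) + 1)) none

lemma pvA_eq_canon (db : List String) : compute_migration_delta_py db = pvCanon db := by
  unfold compute_migration_delta_py pvCanon
  rcases db with _ | ⟨x, xs⟩ <;> simp

lemma pvAltGo_eq_canon (db : List String) :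
    ∀ k, k ≤ pvChain.length → (∀ j, k ≤ j → j < pvChain.length → pvChain.getD j "" ∉ db) →
      pvAltGo (PySem.Set.ofList db) k = pvCanon db := by
  intro k
  induction k with
  | zero =>
    intro _ habove
    have hnone : db.foldl pvAStep none = none := by
      rw [pvFold_none]
      refine ⟨rfl, fun v hv => ?_⟩
      rcases hh : pvHit v with _ | j
      · rfl
      · obtain ⟨hj, he⟩ := pvHit_some v j hh
        exact absurd hv (by rw [← he] at hv ⊢; exact absurd hv (habove j (Nat.zero_le _) hj))
    simp [pvAltGo, pvCanon, hnone]
  | succ k ih =>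
    intro hk habove
    have hk' : k < pvChain.length := hk
    by_cases hmem : pvChain.getD k "" ∈ db
    · have hhit : pvHit (pvChain.getD k "") = some k := pvHit_getD k hk'
      rcases hf : db.foldl pvAStep none with _ | i
      · obtain ⟨-, h2⟩ := (pvFold_none db none).mp hf
        exact absurd (h2 _ hmem) (by rw [hhit]; simp)
      · obtain ⟨h1, -, h3⟩ := pvFold_some db none i hf
        have hki : k ≤ i := h3 _ hmem k hhit
        have hik : i ≤ k := by
          rcases h1 with h1 | ⟨v, hv, hh⟩
          · cases h1
          · obtain ⟨hi, he⟩ := pvHit_some v i hh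
            by_contra hlt
            exact (habove i (by omega) hi) (by rw [he]; exact hv)
        have hik' : i = k := le_antisymm hik hki
        subst hik'
        have hgo : pvAltGo (PySem.Set.ofList db) (i + 1)
            = PySem.List.slice pvChain (some ((i : Int) + 1)) none := by
          rw [pvAltGo]
          rw [if_pos ((PySem.Set.mem_ofList _ _).mpr hmem)]
        rw [hgo]
        unfold pvCanon
        rw [hf]
    · have hgo : pvAltGo (PySem.Set.ofList db) (k + 1) = pvAltGo (PySem.Set.ofList db) k := by
        rw [pvAltGo]
        rw [if_neg (fun hc => hmem ((PySem.Set.mem_ofList _ _).mp hc))]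
      rw [hgo]
      refine ih (by omega) fun j hj hjlen => ?_
      rcases Nat.eq_or_lt_of_le hj with rfl | hj'
      · exact hmem
      · exact habove j hj' hjlen

-- ===== VERDICT (by name: the statement is the Claim_ definition above) =====
theorem compute_migration_delta_py_spec : Claim_equal_compute_migration_delta_py := by
  intro db _
  unfold Spec_compute_migration_delta_py compute_migration_delta_py_alt
  rw [pvA_eq_canon, pvAltGo_eq_canon db pvChain.length le_rfl (by intro j hj hjlen; omega)]
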